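-- pv_equiv track=rewrite | github.com/hannahTao/Coding-Club-Biweekly-Challenges | challenge2.py | square_difference
-- ===== SOURCE A (Python) =====
-- def square_difference(n):
--     sumOfSquares = 0
--     sumOfIntegers = 0
--     for i in range (n+1):       # find sum of squares of integers
--         sumOfSquares += i**2
--     for j in range (n+1):       # find square of sum of integers
--         sumOfIntegers += j
--     return sumOfIntegers**2 - sumOfSquares  # calculate difference
-- ===== SOURCE B (Python) =====
-- def square_difference(n):
--     m = n if n > 0 else 0
--     s = m * (m + 1) // 2
--     return s * s - m * (m + 1) * (2 * m + 1) // 6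
-- ===== Notes on version B (the rewrite author's own statement) =====
-- stated objective: faster
-- what changed: Replaces both O(n) accumulation loops with the closed-form formulas m(m+1)/2 and m(m+1)(2m+1)/6 (m = max(n,0)), an O(1) computation.
import Mathlib
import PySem

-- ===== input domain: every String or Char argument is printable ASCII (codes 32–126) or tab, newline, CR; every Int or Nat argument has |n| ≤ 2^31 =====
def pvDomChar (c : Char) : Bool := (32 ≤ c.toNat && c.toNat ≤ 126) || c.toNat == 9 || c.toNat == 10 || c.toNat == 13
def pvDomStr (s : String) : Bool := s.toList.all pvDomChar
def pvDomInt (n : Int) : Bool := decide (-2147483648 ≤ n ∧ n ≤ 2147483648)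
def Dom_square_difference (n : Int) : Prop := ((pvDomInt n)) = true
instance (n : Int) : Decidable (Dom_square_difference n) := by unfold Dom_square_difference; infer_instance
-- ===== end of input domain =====

-- B replaces A's two O(n) accumulation loops with the closed-form formulas
-- m(m+1)//2 and m(m+1)(2m+1)//6 (m = max(n,0)): O(1) instead of O(n).

-- ===== PORT A =====
def square_difference (n : Int) : Int :=
  let sumOfSquares := (PySem.List.pyRange 0 (n+1) 1).foldl (fun acc i => acc + i^2) 0
  let sumOfIntegers := (PySem.List.pyRange 0 (n+1) 1).foldl (fun acc j => acc + j) 0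
  sumOfIntegers^2 - sumOfSquares

-- ===== PORT B =====
def square_difference_alt (n : Int) : Int :=
  let m := if n > 0 then n else 0
  let s := PySem.Int.floordiv (m * (m + 1)) 2
  s * s - PySem.Int.floordiv (m * (m + 1) * (2 * m + 1)) 6

-- ===== PRECONDITION & SPEC =====
def Spec_square_difference (n : Int) (out : Int) : Prop := out = square_difference_alt n
instance (n : Int) (out : Int) : Decidable (Spec_square_difference n out) := by unfold Spec_square_difference; infer_instance

-- ===== CLAIM (what is proved, stated in full; the proofs are below) =====
def Claim_equal_square_difference : Prop := ∀ (n : Int), Dom_square_difference n → Spec_square_difference n (square_difference n)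

-- ===== LEMMAS AND PROOFS =====

theorem pv_lin_sum (k : Nat) :
    (PySem.List.pyRange 0 (k : Int) 1).foldl (fun acc j => acc + j) 0 * 2 = (k : Int) * ((k : Int) - 1) := by
  induction k with
  | zero => simp [PySem.List.pyRange_one_eq_nil]
  | succ k ih =>
      have h : ((k + 1 : Nat) : Int) = (k : Int) + 1 := by push_cast; ring
      rw [h, PySem.List.pyRange_one_succ_right (by positivity), List.foldl_append]
      simp only [List.foldl_cons, List.foldl_nil]
      linear_combination ih

theorem pv_sq_sum (k : Nat) :
    (PySem.List.pyRange 0 (k : Int) 1).foldl (fun acc i => acc + i ^ 2) 0 * 6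
      = (k : Int) * ((k : Int) - 1) * (2 * (k : Int) - 1) := by
  induction k with
  | zero => simp [PySem.List.pyRange_one_eq_nil]
  | succ k ih =>
      have h : ((k + 1 : Nat) : Int) = (k : Int) + 1 := by push_cast; ring
      rw [h, PySem.List.pyRange_one_succ_right (by positivity), List.foldl_append]
      simp only [List.foldl_cons, List.foldl_nil]
      linear_combination ih

theorem pv_main (n : Int) : square_difference n = square_difference_alt n := by
  unfold square_difference square_difference_alt
  by_cases hn : n > 0
  · simp only [if_pos hn]
    obtain ⟨k, hk⟩ : ∃ k : Nat, n = (k : Int) := ⟨n.toNat, by omega⟩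
    subst hk
    have h1 : (k : Int) + 1 = ((k + 1 : Nat) : Int) := by push_cast; ring
    rw [h1]
    have hl := pv_lin_sum (k + 1)
    have hs := pv_sq_sum (k + 1)
    set L := (PySem.List.pyRange 0 ((k + 1 : Nat) : Int) 1).foldl (fun acc j => acc + j) 0 with hL
    set S := (PySem.List.pyRange 0 ((k + 1 : Nat) : Int) 1).foldl (fun acc i => acc + i ^ 2) 0 with hS
    have e1 : (k : Int) * ((k + 1 : Nat) : Int) = 2 * L := by
      push_cast at hl ⊢; linear_combination -hl
    have e2 : (k : Int) * ((k + 1 : Nat) : Int) * (2 * (k : Int) + 1) = 6 * S := by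
      push_cast at hs ⊢; linear_combination -hs
    rw [e2, e1, PySem.Int.floordiv_eq_ediv_of_pos (by norm_num),
        PySem.Int.floordiv_eq_ediv_of_pos (by norm_num),
        Int.mul_ediv_cancel_left L (by norm_num), Int.mul_ediv_cancel_left S (by norm_num)]
    ring
  · simp only [if_neg hn]
    have hz : (PySem.List.pyRange 0 (n + 1) 1).foldl (fun acc j => acc + j) 0 = 0 := by
      rcases lt_or_ge n 0 with h | h
      · rw [PySem.List.pyRange_one_eq_nil (by omega)]; rfl
      · have : n = 0 := by omega
        subst this
        rw [PySem.List.pyRange_one_singleton]; rfl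
    have hz2 : (PySem.List.pyRange 0 (n + 1) 1).foldl (fun acc i => acc + i ^ 2) 0 = 0 := by
      rcases lt_or_ge n 0 with h | h
      · rw [PySem.List.pyRange_one_eq_nil (by omega)]; rfl
      · have : n = 0 := by omega
        subst this
        rw [PySem.List.pyRange_one_singleton]
        simp
    rw [hz, hz2]
    decide

-- ===== VERDICT (by name: the statement is the Claim_ definition above) =====
theorem square_difference_spec : Claim_equal_square_difference := by
  intro n _
  exact pv_main n
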